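-- pv_equiv track=rewrite | github.com/Nico3270/Proyecto_de_grado | prueba.py | intervalos
-- ===== SOURCE A (Python) =====
-- def intervalos(num):
--     inf = 0
--     sup = 0
--     list = [10,20,30,40,50,60,70,80,90]
--     for x in list:
--         if num - x >=0 and num - x <= 10:
--             inf = x
--             sup= inf + int((num-x)+(10-(num-x)))
--     return(inf,sup)
-- ===== SOURCE B (Python) =====
-- def intervalos(num):
--     # Closed form: the decade is (num//10)*10 clamped to 90, valid only for 10 <= num <= 100.
--     if 10 <= num <= 100:
--         x = min((num // 10) * 10, 90)
--         return (x, x + 10)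
--     return (0, 0)
-- ===== Notes on version B (the rewrite author's own statement) =====
-- stated objective: simpler
-- what changed: Replaces the scan over the nine decade boundaries (with last-match overwrite) by a closed-form computation: clamp (num//10)*10 to 90 when 10 <= num <= 100, else (0,0).
import Mathlib
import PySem

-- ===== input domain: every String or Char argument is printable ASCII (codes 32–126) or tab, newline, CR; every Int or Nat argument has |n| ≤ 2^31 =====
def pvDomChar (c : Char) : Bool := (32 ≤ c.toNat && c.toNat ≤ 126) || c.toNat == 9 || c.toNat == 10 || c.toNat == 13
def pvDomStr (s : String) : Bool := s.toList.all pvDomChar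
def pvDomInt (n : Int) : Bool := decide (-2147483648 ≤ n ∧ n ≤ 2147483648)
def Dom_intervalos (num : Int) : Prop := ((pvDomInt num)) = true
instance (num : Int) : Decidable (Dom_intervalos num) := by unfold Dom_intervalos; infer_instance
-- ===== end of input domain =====

-- B replaces A's scan over the nine decade boundaries by a closed-form decade computation (objective: simpler).

-- ===== PORT A =====
def intervalos (num : Int) : Int × Int :=
  let l : List Int := [10,20,30,40,50,60,70,80,90]
  l.foldl (fun (s : Int × Int) x =>
    if num - x ≥ 0 ∧ num - x ≤ 10 then (x, x + ((num - x) + (10 - (num - x)))) else s) (0, 0)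

-- ===== PORT B =====
def intervalos_alt (num : Int) : Int × Int :=
  if 10 ≤ num ∧ num ≤ 100 then
    let x := min (PySem.Int.floordiv num 10 * 10) 90
    (x, x + 10)
  else (0, 0)

-- ===== PRECONDITION & SPEC =====
def Spec_intervalos (num : Int) (out : Int × Int) : Prop := out = intervalos_alt num
instance (num : Int) (out : Int × Int) : Decidable (Spec_intervalos num out) := by unfold Spec_intervalos; infer_instance

-- ===== CLAIM (what is proved, stated in full; the proofs are below) =====
def Claim_equal_intervalos : Prop := ∀ (num : Int), Dom_intervalos num → Spec_intervalos num (intervalos num)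

-- ===== LEMMAS AND PROOFS =====
theorem intervalos_eq_alt (num : Int) : intervalos num = intervalos_alt num := by
  have hfd : PySem.Int.floordiv num 10 = num / 10 :=
    PySem.Int.floordiv_eq_ediv_of_pos (by norm_num)
  simp only [intervalos, intervalos_alt, List.foldl, hfd]
  have h10 : num / 10 * 10 ≤ num := Int.ediv_mul_le num (by norm_num)
  have h10' : num < (num / 10 + 1) * 10 := Int.lt_ediv_add_one_mul_self num (by norm_num)
  split_ifs with h <;> simp_all <;> omega

-- ===== VERDICT (by name: the statement is the Claim_ definition above) =====
theorem intervalos_spec : Claim_equal_intervalos := by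
  intro num _
  exact intervalos_eq_alt num
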